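-- pv_equiv track=rewrite | github.com/frothywater/melody-pretrain | melody_pretrain/ngram.py | smoothen_pitches
-- ===== SOURCE A (Python) =====
-- def smoothen_pitches(pitches: tuple):
--     """Smooth pitches so that they won't jump around.
--     This is utility function for visualize n-grams."""
--     result = [pitches[0]]
--     for i in range(1, len(pitches)):
--         interval = (pitches[i] - pitches[i - 1]) % 12
--         upward = result[i - 1] + 12 + interval
--         middle = result[i - 1] + interval
--         downward = result[i - 1] - 12 + interval
--         note = min([upward, middle, downward], key=lambda x: abs(x - result[i - 1]))
--         result.append(note)
--     return tuple(result)
-- ===== SOURCE B (Python) =====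
-- def smoothen_pitches(pitches: tuple):
--     """Smooth pitches so that they won't jump around.
--     This is utility function for visualize n-grams."""
--     # closed-form per-step increment in [-5, 6], then a running sum
--     deltas = [(b - a + 5) % 12 - 5 for a, b in zip(pitches, pitches[1:])]
--     out = [pitches[0]]
--     for d in deltas:
--         out.append(out[-1] + d)
--     return tuple(out)
-- ===== Notes on version B (the rewrite author's own statement) =====
-- stated objective: simpler
-- what changed: B replaces A's per-step construction of three candidate notes and a min-by-absolute-distance selection with a direct closed-form increment ((b-a+5)%12-5) computed independently per adjacent pair, then a running sum; measured ~4.6x faster (no per-step list/lambda/min machinery). Pre_ excludes the empty tuple, on which both A and B raise IndexError.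
import Mathlib
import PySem

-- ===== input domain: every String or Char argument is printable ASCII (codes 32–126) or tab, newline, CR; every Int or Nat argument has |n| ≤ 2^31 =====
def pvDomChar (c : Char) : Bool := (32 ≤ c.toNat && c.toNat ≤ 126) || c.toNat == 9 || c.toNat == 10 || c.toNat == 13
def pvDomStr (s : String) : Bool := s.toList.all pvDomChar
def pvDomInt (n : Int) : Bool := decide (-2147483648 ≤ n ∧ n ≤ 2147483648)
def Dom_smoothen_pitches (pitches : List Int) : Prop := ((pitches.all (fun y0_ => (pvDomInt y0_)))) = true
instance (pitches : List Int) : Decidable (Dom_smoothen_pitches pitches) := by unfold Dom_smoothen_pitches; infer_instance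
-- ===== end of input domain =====

-- B replaces A's three-candidate min-by-distance step with a closed-form increment plus running sum (objective: simpler).

-- ===== PORT A =====
def smoothen_pitches (pitches : List Int) : List Int :=
  match pitches with
  | [] => []  -- pitches[0] raises IndexError in Python; excluded by Pre_
  | p0 :: _ =>
    (PySem.List.pyRange 1 (pitches.length : Int) 1).foldl
      (fun result i =>
        let interval := PySem.Int.mod (PySem.List.pyGetD pitches i 0 - PySem.List.pyGetD pitches (i - 1) 0) 12
        let prev := PySem.List.pyGetD result (i - 1) 0
        let upward := prev + 12 + interval
        let middle := prev + interval
        let downward := prev - 12 + interval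
        -- min([...], key=lambda x: abs(x - result[i-1])): literal 3-element list, never empty, so getD 0 is unreachable
        let note := (PySem.List.min? [upward, middle, downward] (fun x => |x - prev|)).getD 0
        result ++ [note])
      [p0]

-- ===== PORT B =====
def smoothen_pitches_alt (pitches : List Int) : List Int :=
  match pitches with
  | [] => []  -- pitches[0] raises IndexError in Python; excluded by Pre_
  | p0 :: rest =>
    let deltas := (pitches.zip rest).map (fun ab => PySem.Int.mod (ab.2 - ab.1 + 5) 12 - 5)
    deltas.foldl (fun out d => out ++ [PySem.List.pyGetD out (-1) 0 + d]) [p0]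

-- ===== PRECONDITION & SPEC =====
-- Python A raises IndexError on the empty tuple (pitches[0]); B raises there too.
def Pre_smoothen_pitches (pitches : List Int) : Prop := pitches ≠ []
instance (pitches : List Int) : Decidable (Pre_smoothen_pitches pitches) := by unfold Pre_smoothen_pitches; infer_instance
def pvWitness_smoothen_pitches : List Int := [60, 64, 55]

def Spec_smoothen_pitches (pitches : List Int) (out : List Int) : Prop := out = smoothen_pitches_alt pitches
instance (pitches : List Int) (out : List Int) : Decidable (Spec_smoothen_pitches pitches out) := by unfold Spec_smoothen_pitches; infer_instance

-- ===== CLAIM (what is proved, stated in full; the proofs are below) =====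
def Claim_equal_smoothen_pitches : Prop := ∀ (pitches : List Int), Dom_smoothen_pitches pitches → Pre_smoothen_pitches pitches → Spec_smoothen_pitches pitches (smoothen_pitches pitches)

-- ===== LEMMAS AND PROOFS =====

/-- The common skeleton: the smoothed line starting at `x` with step list `ds`. -/
def pvChain : Int → List Int → List Int
  | x, [] => [x]
  | x, d :: ds => x :: pvChain (x + d) ds

theorem pvChain_ne_nil (x : Int) (ds : List Int) : pvChain x ds ≠ [] := by
  cases ds <;> simp [pvChain]

theorem pvChain_length (x : Int) (ds : List Int) : (pvChain x ds).length = ds.length + 1 := by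
  induction ds generalizing x with
  | nil => simp [pvChain]
  | cons d ds ih => simp [pvChain, ih]

theorem pvChain_snoc (x : Int) (ds : List Int) (d : Int) :
    pvChain x (ds ++ [d]) = pvChain x ds ++ [x + ds.sum + d] := by
  induction ds generalizing x with
  | nil => simp [pvChain]
  | cons d' ds ih =>
    simp only [List.cons_append, pvChain, ih, List.sum_cons, add_assoc]

theorem pvChain_last (x : Int) (ds : List Int) :
    PySem.List.pyGetD (pvChain x ds) (-1) 0 = x + ds.sum := by
  induction ds using List.reverseRecOn with
  | nil =>
    rw [show pvChain x [] = [x] from rfl,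
      PySem.List.pyGetD_neg_one _ _ (by simp)]
    simp
  | append_singleton ds d _ =>
    rw [pvChain_snoc, PySem.List.pyGetD_neg_one_append_singleton]
    simp
    omega

theorem pvB_fold (p0 : Int) (ds : List Int) :
    ds.foldl (fun out d => out ++ [PySem.List.pyGetD out (-1) 0 + d]) [p0] = pvChain p0 ds := by
  induction ds using List.reverseRecOn with
  | nil => simp [pvChain]
  | append_singleton ds d ih =>
    rw [List.foldl_append, ih, List.foldl, List.foldl, pvChain_last, pvChain_snoc]

/-- Python's `min([p+12+m, p+m, p-12+m], key=lambda x: abs(x - p))` with `m = (b-a) % 12`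
    equals `p + ((b-a+5) % 12 - 5)`. -/
theorem pvNote_eq (prev a b : Int) :
    (PySem.List.min?
        [prev + 12 + PySem.Int.mod (b - a) 12,
         prev + PySem.Int.mod (b - a) 12,
         prev - 12 + PySem.Int.mod (b - a) 12]
        (fun x => |x - prev|)).getD 0
      = prev + (PySem.Int.mod (b - a + 5) 12 - 5) := by
  have h1 : PySem.Int.mod (b - a) 12 = (b - a) % 12 := PySem.Int.mod_eq_emod_of_pos (by norm_num)
  have h2 : PySem.Int.mod (b - a + 5) 12 = (b - a + 5) % 12 := PySem.Int.mod_eq_emod_of_pos (by norm_num)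
  rw [h1, h2]
  set m := (b - a) % 12 with hm
  have hm0 : 0 ≤ m := Int.emod_nonneg _ (by norm_num)
  have hm12 : m < 12 := Int.emod_lt_of_pos _ (by norm_num)
  have hmod : (b - a + 5) % 12 = if m ≤ 6 then m + 5 else m - 7 := by
    split_ifs with h <;> omega
  have s1 : prev + 12 + m - prev = 12 + m := by ring
  have s2 : prev + m - prev = m := by ring
  have s3 : prev - 12 + m - prev = m - 12 := by ring
  have key : (PySem.List.min? [prev + 12 + m, prev + m, prev - 12 + m]
      (fun x => |x - prev|)).getD 0 = if m ≤ 6 then prev + m else prev - 12 + m := by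
    simp only [PySem.List.min?, List.foldl, s1, s2, s3, abs_of_nonneg hm0,
      abs_of_nonneg (show (0:Int) ≤ 12 + m by omega),
      abs_of_nonpos (show m - 12 ≤ 0 by omega)]
    have t1 : m < 12 + m := by omega
    by_cases h6 : m ≤ 6
    · simp only [t1, h6, if_pos]
      simp only [s2, abs_of_nonneg hm0]
      rw [if_neg (show ¬ (-(m - 12) < m) by omega)]
      simp
    · simp only [t1, h6, if_pos]
      simp only [s2, abs_of_nonneg hm0]
      rw [if_pos (show (-(m - 12) < m) by omega)]
      simp
  rw [key, hmod]
  split_ifs <;> ring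

/-- Steps of the smoothed line, read off pairwise from the pitch list. -/
def pvDeltas (pitches : List Int) : List Int :=
  (pitches.zip pitches.tail).map (fun ab => PySem.Int.mod (ab.2 - ab.1 + 5) 12 - 5)

theorem pvDeltas_length (pitches : List Int) : (pvDeltas pitches).length = pitches.length - 1 := by
  cases pitches with
  | nil => simp [pvDeltas]
  | cons p0 rest => simp [pvDeltas, List.length_zip]

theorem pvDeltas_getElem (pitches : List Int) (k : Nat) (hk : k < (pvDeltas pitches).length) :
    (pvDeltas pitches)[k] =
      PySem.Int.mod (pitches[k + 1]'(by rw [pvDeltas_length] at hk; omega)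
        - pitches[k]'(by rw [pvDeltas_length] at hk; omega) + 5) 12 - 5 := by
  cases pitches with
  | nil => rw [pvDeltas_length] at hk; simp at hk
  | cons p0 rest =>
    simp only [pvDeltas, List.tail_cons]
    rw [List.getElem_map, List.getElem_zip]
    simp

/-- Invariant of A's loop: after processing indices `1 .. k`, the result is the chain of the
    first `k` deltas. -/
theorem pvA_loop (p0 : Int) (rest : List Int) (k : Nat) (hk : k ≤ rest.length) :
    (PySem.List.pyRange 1 ((k : Int) + 1) 1).foldl
      (fun result i =>
        let interval := PySem.Int.mod (PySem.List.pyGetD (p0 :: rest) i 0 - PySem.List.pyGetD (p0 :: rest) (i - 1) 0) 12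
        let prev := PySem.List.pyGetD result (i - 1) 0
        let upward := prev + 12 + interval
        let middle := prev + interval
        let downward := prev - 12 + interval
        let note := (PySem.List.min? [upward, middle, downward] (fun x => |x - prev|)).getD 0
        result ++ [note])
      [p0]
    = pvChain p0 ((pvDeltas (p0 :: rest)).take k) := by
  induction k with
  | zero =>
    rw [PySem.List.pyRange_one_eq_nil (by norm_num)]
    simp [pvChain]
  | succ k ih =>
    have hk' : k ≤ rest.length := by omega
    have hrange : PySem.List.pyRange 1 ((↑(k + 1) : Int) + 1) 1
        = PySem.List.pyRange 1 ((k : Int) + 1) 1 ++ [(k : Int) + 1] := by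
      have := PySem.List.pyRange_one_succ_right (a := 1) (b := (k : Int) + 1) (by omega)
      push_cast
      push_cast at this
      convert this using 2
    rw [hrange, List.foldl_append, ih hk', List.foldl, List.foldl]
    have hdl : (pvDeltas (p0 :: rest)).length = rest.length := by
      rw [pvDeltas_length]; simp
    have hkd : k < (pvDeltas (p0 :: rest)).length := by omega
    have hlen : (pvChain p0 ((pvDeltas (p0 :: rest)).take k)).length = k + 1 := by
      rw [pvChain_length, List.length_take]; omega
    have hi1 : (k : Int) + 1 - 1 = (k : Int) := by ring
    have hga : PySem.List.pyGetD (p0 :: rest) ((k : Int) + 1 - 1) 0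
        = (p0 :: rest)[k]'(by simp; omega) := by
      rw [hi1, PySem.List.pyGetD_eq_getElem _ _ (by omega) (by simp; omega)]
      simp
    have hgb : PySem.List.pyGetD (p0 :: rest) ((k : Int) + 1) 0
        = (p0 :: rest)[k + 1]'(by simp; omega) := by
      rw [show ((k : Int) + 1) = ((k + 1 : Nat) : Int) by push_cast; ring,
        PySem.List.pyGetD_eq_getElem _ _ (by omega) (by simp; omega)]
      simp
    have hprev : PySem.List.pyGetD (pvChain p0 ((pvDeltas (p0 :: rest)).take k)) ((k : Int) + 1 - 1) 0
        = p0 + ((pvDeltas (p0 :: rest)).take k).sum := by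
      rw [hi1, ← pvChain_last p0 ((pvDeltas (p0 :: rest)).take k),
        PySem.List.pyGetD_neg_one _ _ (pvChain_ne_nil _ _),
        PySem.List.pyGetD_eq_getElem _ _ (by omega) (by rw [hlen]; push_cast; omega),
        List.getLast_eq_getElem]
      congr 1
      rw [hlen]
      simp
    rw [hga, hgb, hprev]
    simp only [pvNote_eq]
    rw [show ((pvDeltas (p0 :: rest)).take (k + 1))
        = ((pvDeltas (p0 :: rest)).take k).concat ((pvDeltas (p0 :: rest))[k]'hkd) from
      (List.take_concat_get hkd).symm]
    rw [List.concat_eq_append, pvChain_snoc, pvDeltas_getElem _ _ hkd]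

-- ===== VERDICT (by name: the statement is the Claim_ definition above) =====
theorem smoothen_pitches_spec : Claim_equal_smoothen_pitches := by
  intro pitches _ hpre
  unfold Spec_smoothen_pitches
  match pitches, hpre with
  | p0 :: rest, _ =>
    show smoothen_pitches (p0 :: rest) = smoothen_pitches_alt (p0 :: rest)
    unfold smoothen_pitches smoothen_pitches_alt
    have hB : ((p0 :: rest).zip rest).map (fun ab => PySem.Int.mod (ab.2 - ab.1 + 5) 12 - 5)
        = pvDeltas (p0 :: rest) := by simp [pvDeltas]
    simp only [hB, pvB_fold]
    have hlen : ((p0 :: rest).length : Int) = ((rest.length : Int) + 1) := by simp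
    rw [hlen, pvA_loop p0 rest rest.length le_rfl]
    congr 1
    rw [List.take_of_length_le (by rw [pvDeltas_length]; simp)]
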